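-- pv_equiv track=rewrite | github.com/ikokkari/PythonProblems | labs109.py | break_bad
-- ===== SOURCE A (Python) =====
-- def break_bad(word, elements):
--     n, elements = len(word), set(elements)
--     # Cost of breaking word starting from given position.
--     cost = [0 for _ in range(n + 1)]
--     # The optimal move to make in each position.
--     move = [0 for _ in range(n + 1)]
--
--     # Fill in the cost and move tables from end to beginning.
--     for pos in range(n-1, -1, -1):
--         # Try a one-letter element.
--         if word[pos].title() in elements:
--             cost[pos] = 1 + cost[pos + 1]
--             move[pos] = 1
--         else:
--             cost[pos] = 2 + cost[pos + 1]
--         # Try a two-letter element.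
--         if n - pos > 1 and word[pos:pos + 2].title() in elements and cost[pos + 2] <= cost[pos]:
--             cost[pos] = cost[pos + 2]
--             move[pos] = 2
--
--     # Reconstruct the optimal solution from the cost table.
--     result, pos = '', 0
--     while pos < n:
--         if move[pos] == 2:
--             result += f"[{word[pos:pos + 2].title()}]"
--             pos += 2
--         elif move[pos] == 1:
--             result += f"[{word[pos].title()}]"
--             pos += 1
--         else:
--             result += word[pos]
--             pos += 1
--     return result
-- ===== SOURCE B (Python) =====
-- def break_bad(word, elements):
--     # Backward sweep carrying (cost, formatted suffix) pairs for pos+1 and pos+2;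
--     # no cost/move tables and no separate reconstruction pass.
--     n, es = len(word), set(elements)
--     nxt1, nxt2 = (0, ''), (0, '')   # states for pos+1 and pos+2
--     for pos in range(n - 1, -1, -1):
--         c1, s1 = nxt1
--         t1 = word[pos].title()
--         if t1 in es:
--             cur = (1 + c1, '[' + t1 + ']' + s1)
--         else:
--             cur = (2 + c1, word[pos] + s1)
--         if n - pos > 1:
--             t2 = word[pos:pos + 2].title()
--             c2, s2 = nxt2
--             if t2 in es and c2 <= cur[0]:
--                 cur = (c2, '[' + t2 + ']' + s2)
--         nxt1, nxt2 = cur, nxt1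
--     return nxt1[1]
-- ===== Notes on version B (the rewrite author's own statement) =====
-- stated objective: simpler
-- what changed: B replaces A's two int DP tables (cost/move) plus a separate forward reconstruction loop by a single backward sweep that carries only the (cost, formatted suffix string) pairs for pos+1 and pos+2, Fibonacci-style, so the answer string is built in the same pass and no tables or second pass exist.
import Mathlib
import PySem

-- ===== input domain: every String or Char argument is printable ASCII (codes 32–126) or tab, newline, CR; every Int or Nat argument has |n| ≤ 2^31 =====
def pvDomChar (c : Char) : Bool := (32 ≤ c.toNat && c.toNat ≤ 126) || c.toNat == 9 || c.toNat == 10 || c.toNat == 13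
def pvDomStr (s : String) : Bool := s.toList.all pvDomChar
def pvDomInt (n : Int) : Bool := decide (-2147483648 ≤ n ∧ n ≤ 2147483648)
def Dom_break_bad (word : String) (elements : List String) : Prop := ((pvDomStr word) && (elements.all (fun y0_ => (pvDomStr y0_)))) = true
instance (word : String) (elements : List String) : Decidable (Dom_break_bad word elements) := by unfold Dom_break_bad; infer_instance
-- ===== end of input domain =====

-- B replaces A's two DP tables + reconstruction loop by one backward sweep carrying
-- (cost, formatted suffix) pairs for pos+1/pos+2; objective: simpler (return value only).

-- str.title(), exact on ASCII: a letter is uppercased iff the previous char is not a letter.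
def pvTitleAux : Bool → List Char → List Char
  | _, [] => []
  | prev, c :: cs =>
    (if prev then PySem.Chars.lowerChar c else PySem.Chars.upperChar c) :: pvTitleAux (PySem.Chars.isalpha c) cs

def pvTitle (cs : List Char) : List Char := pvTitleAux false cs

-- ===== PORT A =====
-- one iteration of A's backward table-filling loop (indices written are always < n+1 = table length;
-- reads at pos+1/pos+2 are exactly Python's in-range cost[pos+1]/cost[pos+2])
def pvStepA (w : List Char) (es : List String) (st : List Int × List Int) (pos : Nat) : List Int × List Int :=
  let cost := st.1
  let move := st.2
  let st1 :=
    if PySem.Set.contains es (String.ofList (pvTitle [w.getD pos ' '])) then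
      (cost.set pos (1 + cost.getD (pos + 1) 0), move.set pos 1)
    else
      (cost.set pos (2 + cost.getD (pos + 1) 0), move)
  -- word[pos:pos+2] with 0 ≤ pos is (w.drop pos).take 2 (PySem.List.slice_toNat)
  if (decide (w.length - pos > 1) &&
      PySem.Set.contains es (String.ofList (pvTitle ((w.drop pos).take 2))) &&
      decide (st1.1.getD (pos + 2) 0 ≤ st1.1.getD pos 0)) then
    (st1.1.set pos (st1.1.getD (pos + 2) 0), st1.2.set pos 2)
  else
    st1

-- the 'while pos < n' reconstruction loop, with the accumulated result string
def pvReconA (w : List Char) (move : List Int) (acc : String) (pos : Nat) : String :=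
  if h : pos < w.length then
    if move.getD pos 0 == 2 then
      pvReconA w move (acc ++ "[" ++ String.ofList (pvTitle ((w.drop pos).take 2)) ++ "]") (pos + 2)
    else if move.getD pos 0 == 1 then
      pvReconA w move (acc ++ "[" ++ String.ofList (pvTitle [w.getD pos ' ']) ++ "]") (pos + 1)
    else
      pvReconA w move (acc ++ String.ofList [w.getD pos ' ']) (pos + 1)
  else acc
termination_by w.length - pos
decreasing_by all_goals omega

def break_bad (word : String) (elements : List String) : String :=
  let w := word.toList
  let n := w.length
  let es := PySem.Set.ofList elements
  -- for pos in range(n-1, -1, -1): the positions n-1, …, 0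
  let tabs := ((List.range n).reverse).foldl (pvStepA w es) (List.replicate (n + 1) 0, List.replicate (n + 1) 0)
  pvReconA w tabs.2 "" 0

-- ===== PORT B =====
-- one iteration of B's single backward sweep; state = (state for pos+1, state for pos+2)
def pvStepB (w : List Char) (es : List String) (st : (Int × String) × (Int × String)) (pos : Nat) :
    (Int × String) × (Int × String) :=
  let nxt1 := st.1
  let t1 := pvTitle [w.getD pos ' ']
  let cur :=
    if PySem.Set.contains es (String.ofList t1) then
      (1 + nxt1.1, "[" ++ String.ofList t1 ++ "]" ++ nxt1.2)
    else
      (2 + nxt1.1, String.ofList [w.getD pos ' '] ++ nxt1.2)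
  let cur :=
    if w.length - pos > 1 then
      let t2 := pvTitle ((w.drop pos).take 2)
      let nxt2 := st.2
      if PySem.Set.contains es (String.ofList t2) && decide (nxt2.1 ≤ cur.1) then
        (nxt2.1, "[" ++ String.ofList t2 ++ "]" ++ nxt2.2)
      else cur
    else cur
  (cur, nxt1)

def break_bad_alt (word : String) (elements : List String) : String :=
  let w := word.toList
  let es := PySem.Set.ofList elements
  ((((List.range w.length).reverse).foldl (pvStepB w es) ((0, ""), (0, ""))).1).2

-- ===== PRECONDITION & SPEC =====
def Spec_break_bad (word : String) (elements : List String) (out : String) : Prop := out = break_bad_alt word elements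
instance (word : String) (elements : List String) (out : String) : Decidable (Spec_break_bad word elements out) := by unfold Spec_break_bad; infer_instance

-- ===== CLAIM (what is proved, stated in full; the proofs are below) =====
def Claim_equal_break_bad : Prop := ∀ (word : String) (elements : List String), Dom_break_bad word elements → Spec_break_bad word elements (break_bad word elements)

-- ===== LEMMAS AND PROOFS =====

-- the value/string pair B's sweep computes for each suffix position (proof helper)
def pvS (w : List Char) (es : List String) (pos : Nat) : Int × String :=
  if _h : pos < w.length then
    let p1 := pvS w es (pos + 1)
    let t1 := pvTitle [w.getD pos ' ']
    let cur :=
      if PySem.Set.contains es (String.ofList t1) then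
        (1 + p1.1, "[" ++ String.ofList t1 ++ "]" ++ p1.2)
      else
        (2 + p1.1, String.ofList [w.getD pos ' '] ++ p1.2)
    if w.length - pos > 1 then
      let t2 := pvTitle ((w.drop pos).take 2)
      let p2 := pvS w es (pos + 2)
      if PySem.Set.contains es (String.ofList t2) && decide (p2.1 ≤ cur.1) then
        (p2.1, "[" ++ String.ofList t2 ++ "]" ++ p2.2)
      else cur
    else cur
  else (0, "")
termination_by w.length - pos
decreasing_by all_goals omega


-- characterizations of A's tables, phrased with pvS (proof helpers)
def pvOneOK (w : List Char) (es : List String) (i : Nat) : Bool :=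
  PySem.Set.contains es (String.ofList (pvTitle [w.getD i ' ']))

def pvC1 (w : List Char) (es : List String) (i : Nat) : Int :=
  (if pvOneOK w es i then 1 else 2) + (pvS w es (i + 1)).1

def pvTwoOK (w : List Char) (es : List String) (i : Nat) : Bool :=
  decide (w.length - i > 1) &&
  PySem.Set.contains es (String.ofList (pvTitle ((w.drop i).take 2))) &&
  decide ((pvS w es (i + 2)).1 ≤ pvC1 w es i)

def pvMv (w : List Char) (es : List String) (i : Nat) : Int :=
  if i < w.length then (if pvTwoOK w es i then 2 else if pvOneOK w es i then 1 else 0) else 0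

theorem pvS_stop (w : List Char) (es : List String) (pos : Nat) (h : ¬ pos < w.length) :
    pvS w es pos = (0, "") := by
  rw [pvS]; simp [h]

theorem pvS_fst (w : List Char) (es : List String) (i : Nat) :
    (pvS w es i).1 = if i < w.length then (if pvTwoOK w es i then (pvS w es (i + 2)).1 else pvC1 w es i) else 0 := by
  by_cases h : i < w.length
  · conv_lhs => rw [pvS]
    simp only [dif_pos h, if_pos h]
    by_cases h1 : pvOneOK w es i <;> by_cases h2 : w.length - i > 1 <;>
      by_cases h3 : PySem.Set.contains es (String.ofList (pvTitle ((w.drop i).take 2))) = true <;>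
      by_cases h4 : (pvS w es (i + 2)).1 ≤ pvC1 w es i <;>
      (try simp_all [pvTwoOK, pvC1, pvOneOK]) <;> (try split_ifs) <;>
      first | rfl | omega
  · rw [pvS_stop w es i h]
    simp [h]

theorem pvS_snd (w : List Char) (es : List String) (i : Nat) (h : i < w.length) :
    (pvS w es i).2 =
      if pvTwoOK w es i then
        "[" ++ String.ofList (pvTitle ((w.drop i).take 2)) ++ "]" ++ (pvS w es (i + 2)).2
      else if pvOneOK w es i then
        "[" ++ String.ofList (pvTitle [w.getD i ' ']) ++ "]" ++ (pvS w es (i + 1)).2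
      else
        String.ofList [w.getD i ' '] ++ (pvS w es (i + 1)).2 := by
  conv_lhs => rw [pvS]
  simp only [dif_pos h]
  by_cases h1 : pvOneOK w es i <;> by_cases h2 : w.length - i > 1 <;>
    by_cases h3 : PySem.Set.contains es (String.ofList (pvTitle ((w.drop i).take 2))) = true <;>
    by_cases h4 : (pvS w es (i + 2)).1 ≤ pvC1 w es i <;>
    (try simp_all [pvTwoOK, pvC1, pvOneOK]) <;> (try split_ifs) <;>
    first | rfl | omega

theorem pvStepB_eq (w : List Char) (es : List String) (p : Nat) (hp : p < w.length) :
    pvStepB w es (pvS w es (p + 1), pvS w es (p + 2)) p = (pvS w es p, pvS w es (p + 1)) := by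
  conv_rhs => rw [pvS]
  simp only [pvStepB, dif_pos hp]

theorem pvFoldB (w : List Char) (es : List String) :
    ∀ p, p ≤ w.length →
      ((List.range p).reverse).foldl (pvStepB w es) (pvS w es p, pvS w es (p + 1)) = (pvS w es 0, pvS w es 1) := by
  intro p
  induction p with
  | zero => intro _; simp
  | succ q ih =>
    intro hq
    rw [List.range_succ, List.reverse_append]
    simp only [List.reverse_singleton, List.singleton_append, List.foldl_cons]
    rw [pvStepB_eq w es q (by omega)]
    exact ih (by omega)

theorem alt_eq (word : String) (elements : List String) :
    break_bad_alt word elements = (pvS word.toList (PySem.Set.ofList elements) 0).2 := by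
  unfold break_bad_alt
  have h := pvFoldB word.toList (PySem.Set.ofList elements) word.toList.length (le_refl _)
  rw [pvS_stop _ _ word.toList.length (by omega), pvS_stop _ _ (word.toList.length + 1) (by omega)] at h
  exact congrArg (fun z => z.1.2) h

theorem pvGetD_set_self (l : List Int) (j : Nat) (x : Int) (h : j < l.length) :
    (l.set j x).getD j 0 = x := by
  simp [List.getD_eq_getElem?_getD, h]

theorem pvGetD_set_ne (l : List Int) (i j : Nat) (x : Int) (h : i ≠ j) :
    (l.set j x).getD i 0 = l.getD i 0 := by
  simp [List.getD_eq_getElem?_getD, List.getElem?_set_ne (Ne.symm h)]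

theorem pvStepA_getD (w : List Char) (es : List String) (cost move : List Int) (p : Nat)
    (hp : p < w.length)
    (hcl : cost.length = w.length + 1) (hml : move.length = w.length + 1)
    (hc1 : cost.getD (p + 1) 0 = (pvS w es (p + 1)).1)
    (hc2 : cost.getD (p + 2) 0 = (pvS w es (p + 2)).1) :
    (pvStepA w es (cost, move) p).1.length = w.length + 1 ∧
    (pvStepA w es (cost, move) p).2.length = w.length + 1 ∧
    ∀ i, ((pvStepA w es (cost, move) p).1.getD i 0 = if i = p then (pvS w es p).1 else cost.getD i 0) ∧
         ((pvStepA w es (cost, move) p).2.getD i 0 =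
           if i = p then (if pvTwoOK w es p then 2 else if pvOneOK w es p then 1 else move.getD i 0)
           else move.getD i 0) := by
  have hpl : p < cost.length := by omega
  have hSp := pvS_fst w es p
  rw [if_pos hp] at hSp
  simp only [pvStepA]
  by_cases h1 : PySem.Set.contains es (String.ofList (pvTitle [w.getD p ' '])) = true
  · have hone : pvOneOK w es p = true := h1
    have hC1 : pvC1 w es p = 1 + (pvS w es (p + 1)).1 := by simp [pvC1, hone]
    rw [if_pos h1]
    simp only [pvGetD_set_ne cost (p + 2) p _ (by omega), pvGetD_set_self cost p _ hpl, hc2, hc1]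
    by_cases h2 : pvTwoOK w es p
    · have hcond : (decide (w.length - p > 1) &&
          PySem.Set.contains es (String.ofList (pvTitle ((w.drop p).take 2))) &&
          decide ((pvS w es (p + 2)).1 ≤ 1 + (pvS w es (p + 1)).1)) = true := by
        have := h2; simp only [pvTwoOK, hC1] at this; exact this
      rw [if_pos hcond]
      refine ⟨by simp [hcl], by simp [hml], ?_⟩
      intro i
      by_cases hip : i = p
      · subst hip
        constructor
        · rw [pvGetD_set_self _ _ _ (by simp [hcl]; omega)]
          rw [if_pos rfl, hSp, if_pos h2]
        · rw [pvGetD_set_self _ _ _ (by simp [hml]; omega)]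
          rw [if_pos rfl, if_pos h2]
      · constructor
        · rw [pvGetD_set_ne _ _ _ _ hip, pvGetD_set_ne _ _ _ _ hip, if_neg hip]
        · rw [pvGetD_set_ne _ _ _ _ hip, pvGetD_set_ne _ _ _ _ hip, if_neg hip]
    · have hcond : (decide (w.length - p > 1) &&
          PySem.Set.contains es (String.ofList (pvTitle ((w.drop p).take 2))) &&
          decide ((pvS w es (p + 2)).1 ≤ 1 + (pvS w es (p + 1)).1)) = false := by
        have h2' := h2; simp only [pvTwoOK, hC1] at h2'
        exact Bool.not_eq_true _ ▸ (by simpa using h2')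
      rw [if_neg (ne_true_of_eq_false hcond)]
      refine ⟨by simp [hcl], by simp [hml], ?_⟩
      intro i
      by_cases hip : i = p
      · subst hip
        constructor
        · rw [pvGetD_set_self cost _ _ hpl, if_pos rfl, hSp, if_neg h2, hC1]
        · rw [pvGetD_set_self move _ _ (by omega), if_pos rfl, if_neg h2, if_pos hone]
      · constructor
        · rw [pvGetD_set_ne _ _ _ _ hip, if_neg hip]
        · rw [pvGetD_set_ne _ _ _ _ hip, if_neg hip]
  · have hone : pvOneOK w es p = false := by simpa [pvOneOK] using h1
    have hC1 : pvC1 w es p = 2 + (pvS w es (p + 1)).1 := by simp [pvC1, hone]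
    rw [if_neg h1]
    simp only [pvGetD_set_ne cost (p + 2) p _ (by omega), pvGetD_set_self cost p _ hpl, hc2, hc1]
    by_cases h2 : pvTwoOK w es p
    · have hcond : (decide (w.length - p > 1) &&
          PySem.Set.contains es (String.ofList (pvTitle ((w.drop p).take 2))) &&
          decide ((pvS w es (p + 2)).1 ≤ 2 + (pvS w es (p + 1)).1)) = true := by
        have := h2; simp only [pvTwoOK, hC1] at this; exact this
      rw [if_pos hcond]
      refine ⟨by simp [hcl], by simp [hml], ?_⟩
      intro i
      by_cases hip : i = p
      · subst hip
        constructor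
        · rw [pvGetD_set_self _ _ _ (by simp [hcl]; omega)]
          rw [if_pos rfl, hSp, if_pos h2]
        · rw [pvGetD_set_self _ _ _ (by simp [hml]; omega)]
          rw [if_pos rfl, if_pos h2]
      · constructor
        · rw [pvGetD_set_ne _ _ _ _ hip, pvGetD_set_ne _ _ _ _ hip, if_neg hip]
        · rw [pvGetD_set_ne _ _ _ _ hip, if_neg hip]
    · have hcond : (decide (w.length - p > 1) &&
          PySem.Set.contains es (String.ofList (pvTitle ((w.drop p).take 2))) &&
          decide ((pvS w es (p + 2)).1 ≤ 2 + (pvS w es (p + 1)).1)) = false := by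
        have h2' := h2; simp only [pvTwoOK, hC1] at h2'
        exact Bool.not_eq_true _ ▸ (by simpa using h2')
      rw [if_neg (ne_true_of_eq_false hcond)]
      refine ⟨by simp [hcl], by simp [hml], ?_⟩
      intro i
      by_cases hip : i = p
      · subst hip
        constructor
        · rw [pvGetD_set_self cost _ _ hpl, if_pos rfl, hSp, if_neg h2, hC1]
        · rw [if_pos rfl, if_neg h2, if_neg (by simp [hone])]
      · constructor
        · rw [pvGetD_set_ne _ _ _ _ hip, if_neg hip]
        · rw [if_neg hip]

def pvGood (w : List Char) (es : List String) (cost move : List Int) (p : Nat) : Prop :=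
  cost.length = w.length + 1 ∧ move.length = w.length + 1 ∧
  (∀ i, p ≤ i → cost.getD i 0 = (pvS w es i).1 ∧ move.getD i 0 = pvMv w es i) ∧
  (∀ i, i < p → cost.getD i 0 = 0 ∧ move.getD i 0 = 0)

theorem pvStepA_good (w : List Char) (es : List String) (cost move : List Int) (p : Nat)
    (hp : p < w.length) (hg : pvGood w es cost move (p + 1)) :
    pvGood w es (pvStepA w es (cost, move) p).1 (pvStepA w es (cost, move) p).2 p := by
  obtain ⟨hcl, hml, hup, hlo⟩ := hg
  obtain ⟨hl1, hl2, hi⟩ := pvStepA_getD w es cost move p hp hcl hml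
    (hup (p + 1) (le_refl _)).1 (hup (p + 2) (by omega)).1
  refine ⟨hl1, hl2, ?_, ?_⟩
  · intro i hpi
    by_cases hip : i = p
    · have ha := (hi i).1
      have hb := (hi i).2
      rw [if_pos hip] at ha hb
      have hm0 : move.getD i 0 = 0 := (hlo i (by omega)).2
      rw [hm0] at hb
      refine ⟨by rw [ha, hip], ?_⟩
      rw [hb, hip]
      simp only [pvMv, if_pos hp]
    · refine ⟨?_, ?_⟩
      · rw [(hi i).1, if_neg hip]; exact (hup i (by omega)).1
      · rw [(hi i).2, if_neg hip]; exact (hup i (by omega)).2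
  · intro i hpi
    refine ⟨?_, ?_⟩
    · rw [(hi i).1, if_neg (by omega)]; exact (hlo i (by omega)).1
    · rw [(hi i).2, if_neg (by omega)]; exact (hlo i (by omega)).2

theorem pvFoldA (w : List Char) (es : List String) :
    ∀ p, p ≤ w.length → ∀ cost move : List Int, pvGood w es cost move p →
      pvGood w es (((List.range p).reverse).foldl (pvStepA w es) (cost, move)).1
                  (((List.range p).reverse).foldl (pvStepA w es) (cost, move)).2 0 := by
  intro p
  induction p with
  | zero => intro _ cost move hg; simpa using hg
  | succ q ih =>
    intro hq cost move hg
    rw [List.range_succ, List.reverse_append]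
    simp only [List.reverse_singleton, List.singleton_append, List.foldl_cons]
    exact ih (by omega) _ _ (pvStepA_good w es cost move q (by omega) hg)

theorem pvGood_init (w : List Char) (es : List String) :
    pvGood w es (List.replicate (w.length + 1) 0) (List.replicate (w.length + 1) 0) w.length := by
  have hz : ∀ i : Nat, (List.replicate (w.length + 1) (0 : Int)).getD i 0 = 0 := by
    intro i
    simp [List.getD_eq_getElem?_getD, List.getElem?_replicate]
    split <;> rfl
  refine ⟨by simp, by simp, ?_, ?_⟩
  · intro i hi
    refine ⟨?_, ?_⟩
    · rw [hz i, pvS_stop w es i (by omega)]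
    · rw [hz i]; simp [pvMv, Nat.not_lt.mpr hi]
  · intro i hi
    exact ⟨hz i, hz i⟩

theorem pvRecon_eq (w : List Char) (es : List String) (cost move : List Int)
    (hg : pvGood w es cost move 0) :
    ∀ f pos acc, w.length - pos ≤ f → pvReconA w move acc pos = acc ++ (pvS w es pos).2 := by
  obtain ⟨hcl, hml, hup, hlo⟩ := hg
  intro f
  induction f with
  | zero =>
    intro pos acc hf
    rw [pvReconA, dif_neg (by omega), pvS_stop w es pos (by omega)]
    simp
  | succ q ih =>
    intro pos acc hf
    by_cases h : pos < w.length
    · have hmv : move.getD pos 0 = pvMv w es pos := (hup pos (Nat.zero_le _)).2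
      rw [pvReconA, dif_pos h, hmv, pvS_snd w es pos h]
      simp only [pvMv, if_pos h]
      by_cases h2 : pvTwoOK w es pos
      · simp only [h2, if_true]
        rw [if_pos (show ((2 : Int) == 2) = true by decide)]
        rw [ih (pos + 2) _ (by omega)]
        simp [String.append_assoc]
      · simp only [h2, Bool.false_eq_true, if_false]
        by_cases h1 : pvOneOK w es pos
        · simp only [h1, if_true]
          rw [if_neg (show ¬ ((1 : Int) == 2) = true by decide),
            if_pos (show ((1 : Int) == 1) = true by decide)]
          rw [ih (pos + 1) _ (by omega)]
          simp [String.append_assoc]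
        · simp only [h1, Bool.false_eq_true, if_false]
          rw [if_neg (show ¬ ((0 : Int) == 2) = true by decide),
            if_neg (show ¬ ((0 : Int) == 1) = true by decide)]
          rw [ih (pos + 1) _ (by omega)]
          simp [String.append_assoc]
    · rw [pvReconA, dif_neg h, pvS_stop w es pos h]
      simp

theorem a_eq (word : String) (elements : List String) :
    break_bad word elements = (pvS word.toList (PySem.Set.ofList elements) 0).2 := by
  have hg0 := pvFoldA word.toList (PySem.Set.ofList elements) word.toList.length (le_refl _)
    (List.replicate (word.toList.length + 1) 0) (List.replicate (word.toList.length + 1) 0)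
    (pvGood_init word.toList (PySem.Set.ofList elements))
  have hr := pvRecon_eq word.toList (PySem.Set.ofList elements) _ _ hg0
    word.toList.length 0 "" (by omega)
  show pvReconA word.toList
      (((List.range word.toList.length).reverse).foldl
        (pvStepA word.toList (PySem.Set.ofList elements))
        (List.replicate (word.toList.length + 1) 0, List.replicate (word.toList.length + 1) 0)).2
      "" 0 = (pvS word.toList (PySem.Set.ofList elements) 0).2
  rw [hr]
  simp

theorem break_bad_spec : Claim_equal_break_bad := by
  intro word elements _
  unfold Spec_break_bad
  rw [a_eq, alt_eq]
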